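-- pv_equiv track=rewrite | github.com/Muacca/DPPUv2-paper01 | script/DPPUv2_engine_core_v3.py | levi_civita_4d
-- ===== SOURCE A (Python) =====
-- def levi_civita_4d(mu: int, nu: int, rho: int, sigma: int) -> int:
--     """Levi-Civita symbol for 4D indices (0,1,2,3)"""
--     indices = [mu, nu, rho, sigma]
--     if len(set(indices)) != 4:
--         return 0
--     inversions = 0
--     for i in range(4):
--         for j in range(i+1, 4):
--             if indices[i] > indices[j]:
--                 inversions += 1
--     return 1 if inversions % 2 == 0 else -1
-- ===== SOURCE B (Python) =====
-- def levi_civita_4d(mu: int, nu: int, rho: int, sigma: int) -> int: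
--     """Levi-Civita symbol for 4D indices: sign of the product of pairwise differences."""
--     def prod_diffs(xs, p):
--         if not xs:
--             return p
--         x, rest = xs[0], xs[1:]
--         for y in rest:
--             p *= y - x
--         return prod_diffs(rest, p)
--     p = prod_diffs([mu, nu, rho, sigma], 1)
--     return 0 if p == 0 else (1 if p > 0 else -1)
-- ===== Notes on version B (the rewrite author's own statement) =====
-- stated objective: simpler
-- what changed: B replaces A's separate set-based distinctness check plus inversion counting with a single maintained value, the product of pairwise differences (computed by recursive peeling of the head), whose sign is the Levi-Civita symbol.
import Mathlib
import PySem

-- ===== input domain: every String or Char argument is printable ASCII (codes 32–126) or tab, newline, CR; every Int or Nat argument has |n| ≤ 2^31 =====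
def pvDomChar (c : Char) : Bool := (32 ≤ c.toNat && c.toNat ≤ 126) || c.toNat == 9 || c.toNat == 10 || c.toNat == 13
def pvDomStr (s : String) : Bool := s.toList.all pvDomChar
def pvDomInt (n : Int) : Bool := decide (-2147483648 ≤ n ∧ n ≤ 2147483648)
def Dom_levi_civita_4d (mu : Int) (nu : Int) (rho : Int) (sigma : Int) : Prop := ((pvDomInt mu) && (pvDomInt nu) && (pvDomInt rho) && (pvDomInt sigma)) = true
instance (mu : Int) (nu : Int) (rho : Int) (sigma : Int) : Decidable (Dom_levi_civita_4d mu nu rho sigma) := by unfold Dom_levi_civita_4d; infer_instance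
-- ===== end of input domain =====

-- B replaces A's set-based distinctness check + inversion count by the sign of the product of
-- pairwise differences, accumulated by recursively peeling the head of the index list (objective: simpler).


-- ===== PORT A =====
def levi_civita_4d (mu : Int) (nu : Int) (rho : Int) (sigma : Int) : Int :=
  let indices : List Int := [mu, nu, rho, sigma]
  if (PySem.Set.ofList indices).length ≠ 4 then 0
  else
    let inversions : Int :=
      (PySem.List.pyRange 0 4 1).foldl (fun inv i =>
        (PySem.List.pyRange (i + 1) 4 1).foldl (fun inv j =>
          if PySem.List.pyGetD indices i 0 > PySem.List.pyGetD indices j 0 then inv + 1 else inv) inv) 0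
    if PySem.Int.mod inversions 2 = 0 then 1 else -1

-- ===== PORT B =====
-- helper: B's recursive prod_diffs — multiply in (y - x) for the head x against each later y, recurse on the tail
def pvProdDiffs : List Int → Int → Int
  | [], p => p
  | x :: rest, p => pvProdDiffs rest (rest.foldl (fun p y => p * (y - x)) p)

def levi_civita_4d_alt (mu : Int) (nu : Int) (rho : Int) (sigma : Int) : Int :=
  let p := pvProdDiffs [mu, nu, rho, sigma] 1
  if p = 0 then 0 else if p > 0 then 1 else -1

-- ===== PRECONDITION & SPEC =====
def Spec_levi_civita_4d (mu : Int) (nu : Int) (rho : Int) (sigma : Int) (out : Int) : Prop := out = levi_civita_4d_alt mu nu rho sigma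
instance (mu : Int) (nu : Int) (rho : Int) (sigma : Int) (out : Int) : Decidable (Spec_levi_civita_4d mu nu rho sigma out) := by unfold Spec_levi_civita_4d; infer_instance

-- ===== CLAIM (what is proved, stated in full; the proofs are below) =====
def Claim_equal_levi_civita_4d : Prop := ∀ (mu : Int) (nu : Int) (rho : Int) (sigma : Int), Dom_levi_civita_4d mu nu rho sigma → Spec_levi_civita_4d mu nu rho sigma (levi_civita_4d mu nu rho sigma)

-- ===== LEMMAS AND PROOFS =====

-- three-way comparison: the sign of y - x
def pvTri (x y : Int) : Int := if x < y then 1 else if x = y then 0 else -1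

lemma pvTri_neg_one_iff (x y : Int) : y < x ↔ pvTri x y = -1 := by
  unfold pvTri; split_ifs <;> simp <;> omega

lemma pvTri_zero_iff (x y : Int) : x = y ↔ pvTri x y = 0 := by
  unfold pvTri; split_ifs <;> simp <;> omega

lemma pvTri_cases (x y : Int) : pvTri x y = -1 ∨ pvTri x y = 0 ∨ pvTri x y = 1 := by
  unfold pvTri; split_ifs <;> simp

lemma pvSign_sub (x y : Int) : (y - x).sign = pvTri x y := by
  unfold pvTri
  rcases lt_trichotomy x y with h | h | h
  · rw [if_pos h]; exact Int.sign_eq_one_of_pos (by omega)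
  · simp [h]
  · rw [if_neg (by omega), if_neg (by omega)]
    exact Int.sign_eq_neg_one_of_neg (by omega)

lemma pvIfSign (p : Int) : (if p = 0 then (0 : Int) else if p > 0 then 1 else -1) = p.sign := by
  rcases lt_trichotomy p 0 with h | h | h
  · rw [if_neg (by omega), if_neg (by omega)]
    exact (Int.sign_eq_neg_one_of_neg h).symm
  · simp [h]
  · rw [if_neg (by omega), if_pos h]
    exact (Int.sign_eq_one_of_pos h).symm

lemma pvAlt_eq (mu nu rho sigma : Int) :
    levi_civita_4d_alt mu nu rho sigma =
      pvTri mu nu * pvTri mu rho * pvTri mu sigma * pvTri nu rho * pvTri nu sigma * pvTri rho sigma := by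
  show (if pvProdDiffs [mu, nu, rho, sigma] 1 = 0 then (0 : Int)
        else if pvProdDiffs [mu, nu, rho, sigma] 1 > 0 then 1 else -1) = _
  rw [pvIfSign]
  simp only [pvProdDiffs, List.foldl, Int.sign_mul, one_mul, pvSign_sub]

-- the deduplicated index list has fewer than 4 elements exactly when two indices coincide
lemma pvSet_iff (mu nu rho sigma : Int) :
    (PySem.Set.ofList [mu, nu, rho, sigma]).length ≠ 4 ↔
      (mu = nu ∨ mu = rho ∨ mu = sigma ∨ nu = rho ∨ nu = sigma ∨ rho = sigma) := by
  simp only [PySem.Set.ofList, PySem.Set.add, PySem.Set.contains, List.foldl,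
    List.contains_eq_mem, decide_eq_true_eq]
  split_ifs <;> simp_all <;> omega

set_option maxHeartbeats 1000000 in
lemma pvA_eq_direct (mu nu rho sigma : Int) :
    levi_civita_4d mu nu rho sigma =
      (if mu = nu ∨ mu = rho ∨ mu = sigma ∨ nu = rho ∨ nu = sigma ∨ rho = sigma then 0
       else if ((if nu < mu then (1 : Int) else 0) + (if rho < mu then 1 else 0)
              + (if sigma < mu then 1 else 0) + (if rho < nu then 1 else 0)
              + (if sigma < nu then 1 else 0) + (if sigma < rho then 1 else 0)) % 2 = 0
            then 1 else -1) := by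
  unfold levi_civita_4d
  simp only [pvSet_iff]
  by_cases hd : (mu = nu ∨ mu = rho ∨ mu = sigma ∨ nu = rho ∨ nu = sigma ∨ rho = sigma)
  · rw [if_pos hd, if_pos hd]
  · rw [if_neg hd, if_neg hd]
    simp only [show PySem.List.pyRange 0 4 1 = [0,1,2,3] from rfl,
      show PySem.List.pyRange (0+1) 4 1 = [1,2,3] from rfl,
      show PySem.List.pyRange (1+1) 4 1 = [2,3] from rfl,
      show PySem.List.pyRange (2+1) 4 1 = [3] from rfl,
      show PySem.List.pyRange (3+1) 4 1 = [] from rfl,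
      List.foldl]
    simp only [pysem, List.getD, List.getElem?_cons_zero, List.getElem?_cons_succ, Option.getD_some]
    split_ifs <;> omega

lemma pvKey (t1 t2 t3 t4 t5 t6 : Int)
    (h1 : t1 = -1 ∨ t1 = 0 ∨ t1 = 1) (h2 : t2 = -1 ∨ t2 = 0 ∨ t2 = 1)
    (h3 : t3 = -1 ∨ t3 = 0 ∨ t3 = 1) (h4 : t4 = -1 ∨ t4 = 0 ∨ t4 = 1)
    (h5 : t5 = -1 ∨ t5 = 0 ∨ t5 = 1) (h6 : t6 = -1 ∨ t6 = 0 ∨ t6 = 1) :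
    (if t1 = 0 ∨ t2 = 0 ∨ t3 = 0 ∨ t4 = 0 ∨ t5 = 0 ∨ t6 = 0 then (0 : Int)
     else if ((if t1 = -1 then (1 : Int) else 0) + (if t2 = -1 then 1 else 0)
            + (if t3 = -1 then 1 else 0) + (if t4 = -1 then 1 else 0)
            + (if t5 = -1 then 1 else 0) + (if t6 = -1 then 1 else 0)) % 2 = 0
          then 1 else -1) = t1 * t2 * t3 * t4 * t5 * t6 := by
  rcases h1 with rfl | rfl | rfl <;> rcases h2 with rfl | rfl | rfl <;>
    rcases h3 with rfl | rfl | rfl <;> rcases h4 with rfl | rfl | rfl <;>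
    rcases h5 with rfl | rfl | rfl <;> rcases h6 with rfl | rfl | rfl <;> decide

-- ===== VERDICT (by name: the statement is the Claim_ definition above) =====
theorem levi_civita_4d_spec : Claim_equal_levi_civita_4d := by
  intro mu nu rho sigma _
  unfold Spec_levi_civita_4d
  rw [pvAlt_eq, pvA_eq_direct]
  simp only [pvTri_neg_one_iff, pvTri_zero_iff mu nu, pvTri_zero_iff mu rho, pvTri_zero_iff mu sigma,
    pvTri_zero_iff nu rho, pvTri_zero_iff nu sigma, pvTri_zero_iff rho sigma]
  exact pvKey _ _ _ _ _ _ (pvTri_cases mu nu) (pvTri_cases mu rho) (pvTri_cases mu sigma)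
    (pvTri_cases nu rho) (pvTri_cases nu sigma) (pvTri_cases rho sigma)
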